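-- pv_equiv track=rewrite | github.com/mws19901118/Leetcode | Code/Count Pairs in Two Arrays.py | countPairs
-- ===== SOURCE A (Python) =====
-- from typing import List
--
-- def countPairs(nums1: List[int], nums2: List[int]) -> int:
--     sortedDiff = sorted([x - y for x, y in zip(nums1, nums2)])      #nums1[i] + nums1[j] > nums2[i] + nums2[j] => (nums1[i] - nums2[i]) + (nums1[j] - nums2[j]) > 0. It is essentially the unique (i, j) pairs in diff, nums1[x] - nums2[x] that diff[i] + diff[j] > 0. So we calculate diff and sort it.
--     result, left, right = 0, 0, len(sortedDiff) - 1                 #Initialize result and 2 pointers pointing to beginning and end.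
--     while left < right:                                             #Iterate while left < right.
--         if sortedDiff[left] + sortedDiff[right] > 0:                #For current right pointer, all numbers in sortedDiff[left:right] makes a valid pair with right, numbers in sortedDiff[:left] is not valied and numbers in sortedDiff[right + 1:] are already counted.
--             result += right - left                                  #So add right - left to result and move right backwards.
--             right -= 1
--         else:                                                       #Otherwise, move left forward.
--             left += 1
--     return result
-- ===== SOURCE B (Python) =====
-- from typing import List
--
-- def countPairs(nums1: List[int], nums2: List[int]) -> int:
--     diff = sorted(x - y for x, y in zip(nums1, nums2))
--     result = 0
--     for i, x in enumerate(diff):                          # for each position, count strictly later partners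
--         result += sum(1 for y in diff[i + 1:] if x + y > 0)
--     return result
-- ===== Notes on version B (the rewrite author's own statement) =====
-- stated objective: simpler
-- what changed: Replaces A's converging two-pointer sweep over the sorted difference list by a direct per-index count: for each position i it counts the strictly later elements y with diff[i]+y>0 and sums these counts.
import Mathlib
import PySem

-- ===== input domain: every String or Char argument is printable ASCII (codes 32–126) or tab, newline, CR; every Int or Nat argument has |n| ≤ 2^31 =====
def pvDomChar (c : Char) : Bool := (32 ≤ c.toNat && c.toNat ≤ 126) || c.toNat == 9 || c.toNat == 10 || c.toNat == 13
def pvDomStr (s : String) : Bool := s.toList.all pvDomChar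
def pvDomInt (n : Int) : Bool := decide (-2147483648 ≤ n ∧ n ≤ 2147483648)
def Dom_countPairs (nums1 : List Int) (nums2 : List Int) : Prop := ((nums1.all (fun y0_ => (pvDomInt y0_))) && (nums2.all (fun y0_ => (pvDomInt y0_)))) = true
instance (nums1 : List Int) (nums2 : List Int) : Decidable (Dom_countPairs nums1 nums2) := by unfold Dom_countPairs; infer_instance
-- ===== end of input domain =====

-- B replaces A's converging two-pointer sweep by a direct per-index count of strictly
-- later partners in the sorted difference list (simpler decomposition, same return value).

-- ===== PORT A =====
-- the while loop of A: result/left/right state, two-pointer sweep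
def cpLoop (d : List Int) (result left right : Int) : Int :=
  if h : left < right then
    if PySem.List.pyGetD d left 0 + PySem.List.pyGetD d right 0 > 0 then
      cpLoop d (result + (right - left)) left (right - 1)
    else
      cpLoop d result (left + 1) right
  else result
termination_by (right - left).toNat
decreasing_by all_goals omega

def countPairs (nums1 : List Int) (nums2 : List Int) : Int :=
  let sortedDiff := PySem.List.sorted (List.zipWith (fun x y => x - y) nums1 nums2) (fun v => v)
  cpLoop sortedDiff 0 0 ((sortedDiff.length : Int) - 1)

-- ===== PORT B =====
-- diff[i+1:] is PySem.List.slice diff (some (i+1)) none; sum(1 for y in … if c) is the 0/1 map-sum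
def countPairs_alt (nums1 : List Int) (nums2 : List Int) : Int :=
  let diff := PySem.List.sorted (List.zipWith (fun x y => x - y) nums1 nums2) (fun v => v)
  (PySem.List.enumerate diff).foldl
    (fun result p =>
      result + ((PySem.List.slice diff (some (p.1 + 1)) none).map
          (fun y => if p.2 + y > 0 then (1 : Int) else 0)).sum)
    0

-- ===== PRECONDITION & SPEC =====
def Spec_countPairs (nums1 : List Int) (nums2 : List Int) (out : Int) : Prop := out = countPairs_alt nums1 nums2
instance (nums1 : List Int) (nums2 : List Int) (out : Int) : Decidable (Spec_countPairs nums1 nums2 out) := by unfold Spec_countPairs; infer_instance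

-- ===== CLAIM (what is proved, stated in full; the proofs are below) =====
def Claim_equal_countPairs : Prop := ∀ (nums1 : List Int) (nums2 : List Int), Dom_countPairs nums1 nums2 → Spec_countPairs nums1 nums2 (countPairs nums1 nums2)

-- ===== LEMMAS AND PROOFS =====

-- B's per-element count, as structural recursion: for each head, partners strictly later
def pairCnt : List Int → Int
  | [] => 0
  | x :: xs => ((xs.countP fun y => decide (x + y > 0) : Nat) : Int) + pairCnt xs

-- B's fold over enumerate computes pairCnt of the sorted list
lemma alt_loop (D : List Int) : ∀ (xs : List Int) (s : Nat) (acc : Int), D.drop s = xs →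
    (PySem.List.enumerate xs (s : Int)).foldl
      (fun result p =>
        result + ((PySem.List.slice D (some (p.1 + 1)) none).map
            (fun y => if p.2 + y > 0 then (1 : Int) else 0)).sum)
      acc = acc + pairCnt xs := by
  intro xs
  induction xs with
  | nil => intro s acc _; simp [PySem.List.enumerate, pairCnt]
  | cons x xs ih =>
    intro s acc hdrop
    rw [PySem.List.enumerate_cons]
    have hxs : D.drop (s + 1) = xs := by
      rw [← List.drop_drop, hdrop]; rfl
    have hcast : ((s : Int) + 1) = ((s + 1 : Nat) : Int) := by push_cast; ring
    simp only [List.foldl_cons, hcast, PySem.List.slice_from_natCast, hxs]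
    rw [ih (s + 1) _ hxs]
    have hcnt := PySem.List.sum_map_ite_one_zero (fun y => decide (x + y > 0)) xs
    simp only [decide_eq_true_eq] at hcnt
    simp only [pairCnt]
    rw [hcnt]
    ring

-- countP as a sum of indicators over positions
lemma countP_sum (xs : List Int) (p : Int → Bool) :
    ((xs.countP p : Nat) : Int)
      = ∑ j ∈ Finset.range xs.length, (if p (xs.getD j 0) then (1 : Int) else 0) := by
  induction xs with
  | nil => simp
  | cons x xs ih =>
    rw [List.countP_cons]
    simp only [List.length_cons, Finset.sum_range_succ']
    simp only [List.getD_cons_succ, List.getD_cons_zero]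
    rw [← ih]
    push_cast
    by_cases hx : p x <;> simp [hx]

-- shift an Ico sum down by one
lemma sum_Ico_shift (a b : ℕ) (F : ℕ → Int) :
    ∑ j ∈ Finset.Ico (a + 1) (b + 1), F j = ∑ j ∈ Finset.Ico a b, F (j + 1) := by
  rw [Finset.sum_Ico_eq_sum_range, Finset.sum_Ico_eq_sum_range]
  rw [show b + 1 - (a + 1) = b - a from by omega]
  exact Finset.sum_congr rfl (fun k _ => by congr 1; omega)

-- pairCnt as a double indexed sum (row view: each i with its later partners)
lemma pairCnt_eq (d : List Int) :
    pairCnt d = ∑ i ∈ Finset.range d.length, ∑ j ∈ Finset.Ico (i + 1) d.length,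
      (if d.getD i 0 + d.getD j 0 > 0 then (1 : Int) else 0) := by
  induction d with
  | nil => simp [pairCnt]
  | cons x xs ih =>
    simp only [List.length_cons, Finset.sum_range_succ']
    have h0 : ∑ j ∈ Finset.Ico (0 + 1) (xs.length + 1),
        (if (x :: xs).getD 0 0 + (x :: xs).getD j 0 > 0 then (1 : Int) else 0)
        = ((xs.countP fun y => decide (x + y > 0) : Nat) : Int) := by
      rw [sum_Ico_shift 0 xs.length]
      rw [countP_sum xs (fun y => decide (x + y > 0))]
      rw [Finset.range_eq_Ico]
      exact Finset.sum_congr rfl (fun j _ => by simp)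
    have hrow : ∀ i ∈ Finset.range xs.length,
        (∑ j ∈ Finset.Ico (i + 1 + 1) (xs.length + 1),
          (if (x :: xs).getD (i + 1) 0 + (x :: xs).getD j 0 > 0 then (1 : Int) else 0))
        = ∑ j ∈ Finset.Ico (i + 1) xs.length,
          (if xs.getD i 0 + xs.getD j 0 > 0 then (1 : Int) else 0) := by
      intro i _
      rw [sum_Ico_shift (i + 1) xs.length]
      exact Finset.sum_congr rfl (fun j _ => by simp)
    rw [Finset.sum_congr rfl hrow, h0, ← ih]
    simp [pairCnt]
    ring

-- sortedness as monotonicity of positional access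
lemma getD_mono (d : List Int) (hs : d.Pairwise (fun a b => a ≤ b))
    {i j : ℕ} (hij : i ≤ j) (hj : j < d.length) : d.getD i 0 ≤ d.getD j 0 := by
  rcases Nat.lt_or_ge i j with h | h
  · have hi : i < d.length := by omega
    rw [List.getD_eq_getElem d 0 hi, List.getD_eq_getElem d 0 hj]
    exact List.pairwise_iff_getElem.mp hs i j hi hj h
  · have : i = j := by omega
    subst this; rfl

-- the two-pointer loop counts, column-wise, the positive pairs inside the window [l, r]
lemma cpLoop_eq (d : List Int) (hs : d.Pairwise (fun a b => a ≤ b)) :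
    ∀ (k l r : ℕ) (res : Int), l ≤ r → r < d.length → r - l = k →
    cpLoop d res (l : Int) (r : Int)
      = res + ∑ j ∈ Finset.Ico l (r + 1), ∑ i ∈ Finset.Ico l j,
          (if d.getD i 0 + d.getD j 0 > 0 then (1 : Int) else 0) := by
  intro k
  induction k with
  | zero =>
    intro l r res h1 h2 h3
    have : l = r := by omega
    subst this
    rw [cpLoop, dif_neg (by omega)]
    simp [Nat.Ico_succ_singleton]
  | succ k ih =>
    intro l r res h1 h2 h3
    have hlr : l < r := by omega
    rw [cpLoop, dif_pos (by exact_mod_cast hlr)]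
    simp only [PySem.List.pyGetD_natCast]
    by_cases hc : d.getD l 0 + d.getD r 0 > 0
    · rw [if_pos (by exact_mod_cast hc)]
      rw [show (r : Int) - 1 = ((r - 1 : ℕ) : Int) from by omega]
      rw [ih l (r - 1) _ (by omega) (by omega) (by omega)]
      have htop : ∑ j ∈ Finset.Ico l (r + 1), ∑ i ∈ Finset.Ico l j,
            (if d.getD i 0 + d.getD j 0 > 0 then (1 : Int) else 0)
          = (∑ j ∈ Finset.Ico l r, ∑ i ∈ Finset.Ico l j,
              (if d.getD i 0 + d.getD j 0 > 0 then (1 : Int) else 0))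
            + ∑ i ∈ Finset.Ico l r, (if d.getD i 0 + d.getD r 0 > 0 then (1 : Int) else 0) :=
        Finset.sum_Ico_succ_top h1 _
      have hfull : ∑ i ∈ Finset.Ico l r, (if d.getD i 0 + d.getD r 0 > 0 then (1 : Int) else 0)
          = (r : Int) - (l : Int) := by
        have hone : ∀ i ∈ Finset.Ico l r, (if d.getD i 0 + d.getD r 0 > 0 then (1 : Int) else 0) = 1 := by
          intro i hi
          rw [Finset.mem_Ico] at hi
          have hmono := getD_mono d hs (i := l) (j := i) hi.1 (by omega)
          rw [if_pos (by omega)]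
        rw [Finset.sum_congr rfl hone]
        simp [Nat.card_Ico]
        omega
      rw [htop, hfull, show r - 1 + 1 = r from by omega]
      ring
    · rw [if_neg (by exact_mod_cast hc)]
      rw [show (l : Int) + 1 = ((l + 1 : ℕ) : Int) from by omega]
      rw [ih (l + 1) r _ (by omega) h2 (by omega)]
      have hle : d.getD l 0 + d.getD r 0 ≤ 0 := by omega
      have hbot : ∑ j ∈ Finset.Ico l (r + 1), ∑ i ∈ Finset.Ico l j,
            (if d.getD i 0 + d.getD j 0 > 0 then (1 : Int) else 0)
          = ∑ j ∈ Finset.Ico (l + 1) (r + 1), ∑ i ∈ Finset.Ico l j,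
              (if d.getD i 0 + d.getD j 0 > 0 then (1 : Int) else 0) := by
        rw [Finset.sum_eq_sum_Ico_succ_bot (by omega : l < r + 1)]
        simp
      have hcols : ∀ j ∈ Finset.Ico (l + 1) (r + 1),
          (∑ i ∈ Finset.Ico l j, (if d.getD i 0 + d.getD j 0 > 0 then (1 : Int) else 0))
          = ∑ i ∈ Finset.Ico (l + 1) j, (if d.getD i 0 + d.getD j 0 > 0 then (1 : Int) else 0) := by
        intro j hj
        rw [Finset.mem_Ico] at hj
        rw [Finset.sum_eq_sum_Ico_succ_bot (by omega : l < j)]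
        have hj_le : d.getD j 0 ≤ d.getD r 0 := getD_mono d hs (by omega) h2
        rw [if_neg (by omega)]
        ring
      rw [hbot, Finset.sum_congr rfl hcols]

-- column view (pairs grouped by larger index) equals row view (pairs grouped by smaller index)
lemma sum_triangle_comm (n : ℕ) (g : ℕ → ℕ → Int) :
    ∑ j ∈ Finset.range n, ∑ i ∈ Finset.range j, g i j
      = ∑ i ∈ Finset.range n, ∑ j ∈ Finset.Ico (i + 1) n, g i j := by
  have key := Finset.sum_Ico_Ico_comm 0 n (fun i j => if i < j then g i j else 0)
  have hL : ∑ j ∈ Finset.Ico 0 n, ∑ i ∈ Finset.Ico 0 (j + 1), (if i < j then g i j else 0)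
      = ∑ j ∈ Finset.range n, ∑ i ∈ Finset.range j, g i j := by
    rw [← Finset.range_eq_Ico]
    refine Finset.sum_congr rfl (fun j _ => ?_)
    rw [Finset.sum_range_succ, if_neg (lt_irrefl j), add_zero]
    exact Finset.sum_congr rfl (fun i hi => by rw [Finset.mem_range] at hi; rw [if_pos hi])
  have hR : ∑ i ∈ Finset.Ico 0 n, ∑ j ∈ Finset.Ico i n, (if i < j then g i j else 0)
      = ∑ i ∈ Finset.range n, ∑ j ∈ Finset.Ico (i + 1) n, g i j := by
    rw [← Finset.range_eq_Ico]
    refine Finset.sum_congr rfl (fun i hi => ?_)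
    rw [Finset.mem_range] at hi
    rw [Finset.sum_eq_sum_Ico_succ_bot hi, if_neg (lt_irrefl i), zero_add]
    exact Finset.sum_congr rfl (fun j hj => by
      rw [Finset.mem_Ico] at hj; rw [if_pos (by omega : i < j)])
  rw [← hL, ← key, hR]

-- the meeting point: on any sorted list both programs' loops agree
lemma key_eq (d : List Int) (hs : d.Pairwise (fun a b => a ≤ b)) :
    cpLoop d 0 0 ((d.length : Int) - 1)
      = (PySem.List.enumerate d).foldl
          (fun result p =>
            result + ((PySem.List.slice d (some (p.1 + 1)) none).map
                (fun y => if p.2 + y > 0 then (1 : Int) else 0)).sum)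
          0 := by
  have hB : (PySem.List.enumerate d).foldl
      (fun result p =>
        result + ((PySem.List.slice d (some (p.1 + 1)) none).map
            (fun y => if p.2 + y > 0 then (1 : Int) else 0)).sum)
      0 = pairCnt d := by
    have := alt_loop d d 0 0 (by simp)
    simpa using this
  rw [hB]
  rcases Nat.eq_zero_or_pos d.length with h0 | hpos
  · have : d = [] := List.length_eq_zero_iff.mp h0
    subst this
    rw [cpLoop, dif_neg (by norm_num)]
    simp [pairCnt]
  · rw [show ((d.length : Int) - 1) = ((d.length - 1 : ℕ) : Int) from by omega]
    have hA := cpLoop_eq d hs (d.length - 1) 0 (d.length - 1) 0 (by omega) (by omega) rfl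
    simp only [Nat.cast_zero] at hA
    rw [hA, show d.length - 1 + 1 = d.length from by omega]
    rw [← Finset.range_eq_Ico]
    rw [sum_triangle_comm d.length
      (fun i j => if d.getD i 0 + d.getD j 0 > 0 then (1 : Int) else 0)]
    rw [pairCnt_eq d]
    ring

-- ===== VERDICT (by name: the statement is the Claim_ definition above) =====
theorem countPairs_spec : Claim_equal_countPairs := by
  intro nums1 nums2 _
  unfold Spec_countPairs countPairs countPairs_alt
  exact key_eq _ (PySem.List.sorted_pairwise _ _)
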